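-- pv_equiv track=rewrite | github.com/opensearch-project/opensearch-build | src/validation_workflow/validation_args.py | get_distribution_type
-- ===== SOURCE A (Python) =====
-- def get_distribution_type(file_path: dict) -> str:
--     if (any("tar" in value for value in file_path.values())):
--         return 'tar'
--     elif (any("repo" in value for value in file_path.values())):
--         return 'yum'
--     elif (any("rpm" in value for value in file_path.values())):
--         return 'rpm'
--     else:
--         raise Exception("Provided distribution is not supported")
-- ===== SOURCE B (Python) =====
-- def get_distribution_type(file_path: dict) -> str:
--     def rank(value):
--         if "tar" in value:
--             return 0
--         if "repo" in value:
--             return 1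
--         if "rpm" in value:
--             return 2
--         return 3
--     best = min(map(rank, file_path.values()), default=3)
--     if best == 3:
--         raise Exception("Provided distribution is not supported")
--     return ("tar", "yum", "rpm")[best]
-- ===== Notes on version B (the rewrite author's own statement) =====
-- stated objective: alternative
-- what changed: Instead of three global short-circuit substring scans, B classifies each value independently into a priority rank (0=tar, 1=repo, 2=rpm, 3=none), reduces the ranks with min, and maps the minimal rank through a lookup table; this map-reduce yields the same tar>yum>rpm priority because that priority equals the minimum per-value rank.
import Mathlib
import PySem

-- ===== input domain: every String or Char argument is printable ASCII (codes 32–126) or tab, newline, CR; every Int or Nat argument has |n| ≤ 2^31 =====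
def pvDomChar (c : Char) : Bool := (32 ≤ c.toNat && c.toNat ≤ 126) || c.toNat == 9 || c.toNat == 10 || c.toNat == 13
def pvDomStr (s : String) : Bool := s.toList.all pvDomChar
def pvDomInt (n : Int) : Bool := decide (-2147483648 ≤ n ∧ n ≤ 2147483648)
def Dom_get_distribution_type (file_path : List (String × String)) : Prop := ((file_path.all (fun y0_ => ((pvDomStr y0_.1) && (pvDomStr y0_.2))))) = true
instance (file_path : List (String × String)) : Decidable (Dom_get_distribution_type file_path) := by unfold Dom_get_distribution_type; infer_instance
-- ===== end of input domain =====

-- B replaces A's three global short-circuit scans by a map-reduce: each value is classified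
-- into a priority rank (0=tar, 1=repo, 2=rpm, 3=none), the ranks are reduced by min, and the
-- minimal rank is mapped through a lookup table. Equivalence is about the return value;
-- both raise identically on unsupported input (excluded by Pre_).

-- ===== PORT A =====
def get_distribution_type (file_path : List (String × String)) : String :=
  if file_path.any (fun kv => PySem.Str.isIn "tar" kv.2) then "tar"
  else if file_path.any (fun kv => PySem.Str.isIn "repo" kv.2) then "yum"
  else if file_path.any (fun kv => PySem.Str.isIn "rpm" kv.2) then "rpm"
  else ""  -- Python raises Exception here; excluded by Pre_

-- ===== PORT B =====
def pvRank (value : String) : Nat :=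
  if PySem.Str.isIn "tar" value then 0
  else if PySem.Str.isIn "repo" value then 1
  else if PySem.Str.isIn "rpm" value then 2
  else 3

def get_distribution_type_alt (file_path : List (String × String)) : String :=
  let best := (PySem.List.min? (file_path.map (fun kv => pvRank kv.2)) (fun x => x)).getD 3
  if best = 3 then ""  -- Python raises Exception here; excluded by Pre_
  else (["tar", "yum", "rpm"].getD best "")

-- ===== PRECONDITION & SPEC =====
-- Pre_ excludes exactly the inputs where no value contains "tar"/"repo"/"rpm": both A and B raise Exception there.
def Pre_get_distribution_type (file_path : List (String × String)) : Prop :=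
  file_path.any (fun kv => PySem.Str.isIn "tar" kv.2 || PySem.Str.isIn "repo" kv.2 || PySem.Str.isIn "rpm" kv.2) = true
instance (file_path : List (String × String)) : Decidable (Pre_get_distribution_type file_path) := by unfold Pre_get_distribution_type; infer_instance
def pvWitness_get_distribution_type : (List (String × String)) := [("linux", "opensearch-min-2.0.0-linux-x64.tar.gz")]

def Spec_get_distribution_type (file_path : List (String × String)) (out : String) : Prop := out = get_distribution_type_alt file_path
instance (file_path : List (String × String)) (out : String) : Decidable (Spec_get_distribution_type file_path out) := by unfold Spec_get_distribution_type; infer_instance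

-- ===== CLAIM =====
def Claim_equal_get_distribution_type : Prop := ∀ (file_path : List (String × String)), Dom_get_distribution_type file_path → Pre_get_distribution_type file_path → Spec_get_distribution_type file_path (get_distribution_type file_path)

-- ===== LEMMAS AND PROOFS =====
-- The priority verdict of A, as a single rank in {0,1,2,3}; equals the min of per-value ranks.
def pvListRank (l : List (String × String)) : Nat :=
  if l.any (fun kv => PySem.Str.isIn "tar" kv.2) then 0
  else if l.any (fun kv => PySem.Str.isIn "repo" kv.2) then 1
  else if l.any (fun kv => PySem.Str.isIn "rpm" kv.2) then 2
  else 3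

theorem pvListRank_cons (x : String × String) (l : List (String × String)) :
    pvListRank (x :: l) = min (pvRank x.2) (pvListRank l) := by
  simp only [pvListRank, pvRank, List.any_cons]
  by_cases h1 : PySem.Str.isIn "tar" x.2 = true <;>
  by_cases h2 : PySem.Str.isIn "repo" x.2 = true <;>
  by_cases h3 : PySem.Str.isIn "rpm" x.2 = true <;>
  simp only [Bool.not_eq_true] at h1 h2 h3 <;>
  simp only [h1, h2, h3, Bool.true_or, Bool.false_or] <;>
  split_ifs <;> simp_all

theorem pvRank_le (v : String) : pvRank v ≤ 3 := by
  unfold pvRank; split_ifs <;> omega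

theorem pvFold_min (l : List (String × String)) (b : Nat) (hb : b ≤ 3) :
    (l.map (fun kv => pvRank kv.2)).foldl min b = min b (pvListRank l) := by
  induction l generalizing b with
  | nil =>
    simp only [List.map_nil, List.foldl_nil, pvListRank, List.any_nil,
      Bool.false_eq_true, if_false]
    omega
  | cons x xs ih =>
    have h := pvRank_le x.2
    rw [List.map_cons, List.foldl_cons, ih (min b (pvRank x.2)) (by omega), pvListRank_cons]
    omega

theorem pvMin_eq (l : List (String × String)) :
    (PySem.List.min? (l.map (fun kv => pvRank kv.2)) (fun x => x)).getD 3 = pvListRank l := by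
  cases l with
  | nil => simp [PySem.List.min?, pvListRank]
  | cons x xs =>
    rw [List.map_cons, PySem.List.min?_id_cons, Option.getD_some,
      pvFold_min xs (pvRank x.2) (pvRank_le x.2), pvListRank_cons]

-- ===== VERDICT =====
theorem get_distribution_type_spec : Claim_equal_get_distribution_type := by
  intro fp _ _
  show get_distribution_type fp = get_distribution_type_alt fp
  rw [get_distribution_type_alt, get_distribution_type]
  simp only [pvMin_eq]
  rw [pvListRank]
  by_cases h1 : fp.any (fun kv => PySem.Str.isIn "tar" kv.2) = true <;>
  by_cases h2 : fp.any (fun kv => PySem.Str.isIn "repo" kv.2) = true <;>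
  by_cases h3 : fp.any (fun kv => PySem.Str.isIn "rpm" kv.2) = true <;>
  simp only [Bool.not_eq_true] at h1 h2 h3 <;>
  simp only [h1, h2, h3, if_true, if_false, Bool.false_eq_true] <;>
  rfl
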